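-- pv_equiv track=rewrite | github.com/SoftSec-KAIST/Reassessor | legacy/bakcup_match_ramblr.py | reduce_expr
-- ===== SOURCE A (Python) =====
-- def reduce_expr(s):
--     if s.count('[') > 1:
--         e = ''
--         met_paren = False
--         for c in s:
--             if not met_paren:
--                 e += c
--                 if c == '[' or c == ']':
--                     met_paren = True
--             else:
--                 if c == '[' or c == ']':
--                     met_paren = False
--         return e
--     else:
--         return s
-- ===== SOURCE B (Python) =====
-- def _find_bracket(s):
--     for i, c in enumerate(s):
--         if c == '[' or c == ']':
--             return i
--     return -1
--
-- def reduce_expr(s):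
--     if s.count('[') > 1:
--         out = []
--         rest = s
--         while True:
--             i = _find_bracket(rest)
--             if i < 0:
--                 out.append(rest)
--                 break
--             j = _find_bracket(rest[i+1:])
--             if j < 0:
--                 out.append(rest[:i+1])
--                 break
--             out.append(rest[:i+1])
--             rest = rest[i+2+j:]
--         return ''.join(out)
--     else:
--         return s
-- ===== Notes on version B (the rewrite author's own statement) =====
-- stated objective: alternative
-- what changed: Replaces A's char-by-char met_paren toggle state machine with a loop that finds the next two bracket positions, keeps the slice through the first bracket and skips through the second, joining the kept chunks.
import Mathlib
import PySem

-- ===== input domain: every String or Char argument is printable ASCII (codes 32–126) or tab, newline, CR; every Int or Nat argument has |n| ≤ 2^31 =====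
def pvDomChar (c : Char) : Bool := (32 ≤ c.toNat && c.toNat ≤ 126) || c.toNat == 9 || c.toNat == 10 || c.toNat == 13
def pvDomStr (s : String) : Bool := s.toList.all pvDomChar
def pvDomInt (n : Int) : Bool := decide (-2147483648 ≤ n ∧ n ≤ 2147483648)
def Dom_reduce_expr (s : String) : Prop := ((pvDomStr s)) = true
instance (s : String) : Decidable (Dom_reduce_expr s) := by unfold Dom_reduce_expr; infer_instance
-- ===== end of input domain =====

-- B replaces A's char-by-char toggle state machine by a bracket-seeking slice loop
-- (find the next two brackets, keep the chunk through the first, drop through the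
-- second); objective: alternative decomposition. Return-value equivalence only;
-- neither version mutates its argument.

-- ===== PORT A =====
-- A's for-loop over s with state (e, met_paren), as structural recursion on the chars.
def pvALoop : List Char → List Char → Bool → List Char
  | [], e, _ => e
  | c :: cs, e, met =>
    if !met then
      pvALoop cs (e ++ [c]) (c = '[' ∨ c = ']')
    else
      pvALoop cs e (if c = '[' ∨ c = ']' then false else met)

def reduce_expr (s : String) : String :=
  if s.toList.count '[' > 1 then
    String.ofList (pvALoop s.toList [] false)
  else
    s

-- ===== PORT B =====
-- B's helper _find_bracket: first index of '[' or ']' (none = Python's -1).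
def pvFindBr : List Char → Option Nat
  | [] => none
  | c :: cs => if c = '[' ∨ c = ']' then some 0 else (pvFindBr cs).map (· + 1)

theorem pvFindBr_some_ne_nil {l : List Char} {i : Nat} (_h : pvFindBr l = some i) : l ≠ [] := by
  intro hn; subst hn; simp [pvFindBr] at _h

-- B's while-loop: collect the kept chunks, advancing past each bracket pair.
def pvBLoop (rest : List Char) : List (List Char) :=
  match h : pvFindBr rest with
  | none => [rest]
  | some i =>
    match pvFindBr (rest.drop (i + 1)) with
    | none => [rest.take (i + 1)]
    | some j => rest.take (i + 1) :: pvBLoop (rest.drop (i + 2 + j))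
termination_by rest.length
decreasing_by
  have hne := pvFindBr_some_ne_nil h
  have : rest.length ≠ 0 := by simpa [List.length_eq_zero_iff] using hne
  simp [List.length_drop]; omega

def reduce_expr_alt (s : String) : String :=
  if s.toList.count '[' > 1 then
    String.ofList (pvBLoop s.toList).flatten
  else
    s

-- ===== PRECONDITION & SPEC =====
def Spec_reduce_expr (s : String) (out : String) : Prop := out = reduce_expr_alt s
instance (s : String) (out : String) : Decidable (Spec_reduce_expr s out) := by unfold Spec_reduce_expr; infer_instance

-- ===== CLAIM (what is proved, stated in full; the proofs are below) =====
def Claim_equal_reduce_expr : Prop := ∀ (s : String), Dom_reduce_expr s → Spec_reduce_expr s (reduce_expr s)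

-- ===== LEMMAS AND PROOFS =====

-- the accumulator splits off
theorem pvALoop_acc (l : List Char) : ∀ (e : List Char) (met : Bool),
    pvALoop l e met = e ++ pvALoop l [] met := by
  induction l with
  | nil => intro e met; simp [pvALoop]
  | cons c cs ih =>
    intro e met
    cases met
    · show pvALoop cs (e ++ [c]) _ = e ++ pvALoop cs ([] ++ [c]) _
      rw [ih (e ++ [c]), ih ([] ++ [c])]
      simp
    · show pvALoop cs e _ = e ++ pvALoop cs [] _
      exact ih e _

-- no bracket left: the copying state copies everything
theorem pvALoop_copy_none {l : List Char} (h : pvFindBr l = none) :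
    pvALoop l [] false = l := by
  induction l with
  | nil => simp [pvALoop]
  | cons c cs ih =>
    by_cases hb : c = '[' ∨ c = ']'
    · simp [pvFindBr, hb] at h
    · simp [pvFindBr, hb] at h
      show pvALoop cs ([] ++ [c]) _ = c :: cs
      rw [pvALoop_acc]
      simp only [List.nil_append, List.cons_append, List.nil_append]
      have hd : decide (c = '[' ∨ c = ']') = false := by simp [hb]
      rw [hd, ih h]

-- copying up to and including the first bracket, then switching to skipping
theorem pvALoop_copy_some : ∀ (l : List Char) (i : Nat), pvFindBr l = some i →
    pvALoop l [] false = l.take (i + 1) ++ pvALoop (l.drop (i + 1)) [] true := by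
  intro l
  induction l with
  | nil => intro i h; simp [pvFindBr] at h
  | cons c cs ih =>
    intro i h
    by_cases hb : c = '[' ∨ c = ']'
    · simp [pvFindBr, hb] at h
      subst h
      show pvALoop cs ([] ++ [c]) _ = List.take 1 (c :: cs) ++ pvALoop (List.drop 1 (c :: cs)) [] true
      rw [pvALoop_acc]
      have hd : decide (c = '[' ∨ c = ']') = true := by simp [hb]
      rw [hd]
      simp
    · simp [pvFindBr, hb] at h
      obtain ⟨i', hi', rfl⟩ := h
      show pvALoop cs ([] ++ [c]) _ = List.take (i' + 1 + 1) (c :: cs) ++ pvALoop (List.drop (i' + 1 + 1) (c :: cs)) [] true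
      rw [pvALoop_acc]
      have hd : decide (c = '[' ∨ c = ']') = false := by simp [hb]
      rw [hd, ih i' hi']
      simp

-- no bracket left: the skipping state drops everything
theorem pvALoop_skip_none {l : List Char} (h : pvFindBr l = none) :
    pvALoop l [] true = [] := by
  induction l with
  | nil => simp [pvALoop]
  | cons c cs ih =>
    by_cases hb : c = '[' ∨ c = ']'
    · simp [pvFindBr, hb] at h
    · simp [pvFindBr, hb] at h
      show pvALoop cs [] _ = []
      have hd : (if c = '[' ∨ c = ']' then false else true) = true := by simp [hb]
      rw [hd, ih h]

-- skipping drops through the next bracket, then copies again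
theorem pvALoop_skip_some : ∀ (l : List Char) (j : Nat), pvFindBr l = some j →
    pvALoop l [] true = pvALoop (l.drop (j + 1)) [] false := by
  intro l
  induction l with
  | nil => intro j h; simp [pvFindBr] at h
  | cons c cs ih =>
    intro j h
    by_cases hb : c = '[' ∨ c = ']'
    · simp [pvFindBr, hb] at h
      subst h
      show pvALoop cs [] _ = pvALoop (List.drop 1 (c :: cs)) [] false
      have hd : (if c = '[' ∨ c = ']' then false else true) = false := by simp [hb]
      rw [hd]
      simp
    · simp [pvFindBr, hb] at h
      obtain ⟨j', hj', rfl⟩ := h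
      show pvALoop cs [] _ = pvALoop (List.drop (j' + 1 + 1) (c :: cs)) [] false
      have hd : (if c = '[' ∨ c = ']' then false else true) = true := by simp [hb]
      rw [hd, ih j' hj']
      simp

-- the core equivalence: A's state machine equals B's chunk loop, by strong induction on length
theorem pvMain : ∀ (n : Nat) (l : List Char), l.length ≤ n →
    pvALoop l [] false = (pvBLoop l).flatten := by
  intro n
  induction n with
  | zero =>
    intro l hl
    have : l = [] := by simpa [List.length_eq_zero_iff] using Nat.le_zero.mp hl
    subst this
    simp [pvALoop, pvBLoop, pvFindBr]
  | succ n ih =>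
    intro l hl
    rw [pvBLoop]
    split
    · rename_i h1
      exact (pvALoop_copy_none h1).trans (by simp)
    · rename_i i h1
      rcases h2 : pvFindBr (l.drop (i + 1)) with _ | j
      · simp [pvALoop_copy_some l i h1, pvALoop_skip_none h2]
      · have hne := pvFindBr_some_ne_nil h1
        have hlen : l.length ≠ 0 := by simpa [List.length_eq_zero_iff] using hne
        have hdec : (l.drop (i + 2 + j)).length ≤ n := by
          simp [List.length_drop]; omega
        have hdd : (l.drop (i + 1)).drop (j + 1) = l.drop (i + 2 + j) := by
          rw [List.drop_drop]; ring_nf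
        rw [pvALoop_copy_some l i h1, pvALoop_skip_some _ j h2, hdd, ih _ hdec]
        simp

-- ===== VERDICT (by name: the statement is the Claim_ definition above) =====
theorem reduce_expr_spec : Claim_equal_reduce_expr := by
  intro s _
  unfold Spec_reduce_expr reduce_expr reduce_expr_alt
  by_cases h : s.toList.count '[' > 1
  · simp only [h, if_pos]
    rw [pvMain s.toList.length s.toList le_rfl]
  · simp [h]
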